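-- pv_equiv track=rewrite | github.com/Aakash-Bathri/Competative-Programming | Codeforces/div2 - 996/fragments.py | can_craft
-- ===== SOURCE A (Python) =====
-- def can_craft(n, a, b):
--     # Convert lists to arrays for easier manipulation
--     current = list(a)
--     required = list(b)
--
--     # First check if we already have enough of everything
--     if all(current[i] >= required[i] for i in range(n)):
--         return True
--
--     # Key insight: Each operation reduces total materials by (n-2)
--     # If we need more total materials than we have, it's impossible
--     total_current = sum(current)
--     total_required = sum(required)
--     if total_current < total_required:
--         return False
--
--     # For each material that we need more of
--     for i in range(n):
--         deficit = required[i] - current[i]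
--         if deficit <= 0:
--             continue
--
--         # Check if we have enough of other materials to perform the operations
--         min_others = float('inf')
--         others_sum = 0
--         for j in range(n):
--             if j == i:
--                 continue
--             # We need deficit operations, each costing 1 unit
--             extra = current[j] - required[j]  # How much we can spare
--             if extra < deficit:  # Not enough to spare
--                 return False
--             min_others = min(min_others, extra)
--             others_sum += extra
--
--         # We need enough materials from others to cover all operations
--         if min_others * (n-1) < deficit or others_sum < deficit * (n-1):
--             return False
--
--     return True
-- ===== SOURCE B (Python) =====
-- def can_craft(n, a, b):
--     # Indices (below n) where we lack material.
--     deficits = [i for i in range(n) if a[i] < b[i]]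
--     if not deficits:
--         return True
--     if sum(a) < sum(b):
--         return False
--     if len(deficits) != 1:
--         return False
--     i = deficits[0]
--     d = b[i] - a[i]
--     return all(a[j] - b[j] >= d for j in range(n) if j != i)
-- ===== Notes on version B (the rewrite author's own statement) =====
-- stated objective: simpler
-- what changed: B collects the deficit indices once and decides directly (no deficit -> True; total shortfall -> False; more than one deficit -> False; one deficit d -> every other index must spare at least d), replacing A's per-deficit inner loop that tracks a running minimum and sum of spares and its float('inf') sentinel.
-- outside the precondition, e.g. on can_craft(10, [-1, 0, 95, -3, 5], [-1, -2, -1, 0, 2, -14]): A returns False, B raises IndexError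
import Mathlib
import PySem

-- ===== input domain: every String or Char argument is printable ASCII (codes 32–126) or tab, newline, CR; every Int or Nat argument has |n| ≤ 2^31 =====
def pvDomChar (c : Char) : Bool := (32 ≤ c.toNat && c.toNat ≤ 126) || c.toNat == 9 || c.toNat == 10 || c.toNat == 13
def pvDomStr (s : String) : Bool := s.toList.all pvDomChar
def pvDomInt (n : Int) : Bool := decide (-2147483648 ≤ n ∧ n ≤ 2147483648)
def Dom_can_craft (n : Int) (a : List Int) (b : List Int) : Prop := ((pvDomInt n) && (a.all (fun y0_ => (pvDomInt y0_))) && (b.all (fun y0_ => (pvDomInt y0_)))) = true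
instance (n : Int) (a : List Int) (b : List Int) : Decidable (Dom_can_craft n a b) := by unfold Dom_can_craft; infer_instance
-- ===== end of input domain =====

-- B replaces A's per-deficit inner scan (running min / running sum of spares, float('inf')
-- sentinel) by one pass collecting the deficit indices and a direct decision; objective: simpler.

-- ===== PORT A =====
-- inner `for j in range(n)` loop of A: state (min_others, others_sum); `min_others` starts at
-- float('inf'), encoded as `none`; result `none` = the early `return False` on `extra < deficit`.
def canCraftInnerA (cur req : List Int) (i deficit : Int) :
    List Int → Option Int → Int → Option (Option Int × Int)
  | [], m, s => some (m, s)
  | j :: js, m, s =>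
    if j = i then canCraftInnerA cur req i deficit js m s
    else
      let extra := PySem.List.pyGetD cur j 0 - PySem.List.pyGetD req j 0
      if extra < deficit then none
      else canCraftInnerA cur req i deficit js
        (some (match m with | none => extra | some mv => min mv extra)) (s + extra)

-- outer `for i in range(n)` loop of A.  When `min_others` is still float('inf') (m = none),
-- Python's `inf * (n-1) < deficit` is `inf < deficit` (n ≥ 2) or `nan < deficit` (n = 1, the
-- only cases reachable since the loop runs i ∈ range(n)), both False — encoded as `false`.
def canCraftOuterA (n : Int) (cur req : List Int) : List Int → Bool
  | [] => true
  | i :: is =>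
    let deficit := PySem.List.pyGetD req i 0 - PySem.List.pyGetD cur i 0
    if deficit ≤ 0 then canCraftOuterA n cur req is
    else
      match canCraftInnerA cur req i deficit (PySem.List.pyRange 0 n 1) none 0 with
      | none => false
      | some (m, s) =>
        if (match m with | none => false | some mv => decide (mv * (n - 1) < deficit))
            || decide (s < deficit * (n - 1)) then false
        else canCraftOuterA n cur req is

def can_craft (n : Int) (a : List Int) (b : List Int) : Bool :=
  let current := a
  let required := b
  if (PySem.List.pyRange 0 n 1).all
      (fun i => decide (PySem.List.pyGetD required i 0 ≤ PySem.List.pyGetD current i 0)) then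
    true
  else
    let total_current := current.sum
    let total_required := required.sum
    if total_current < total_required then false
    else canCraftOuterA n current required (PySem.List.pyRange 0 n 1)

-- ===== PORT B =====
def can_craft_alt (n : Int) (a : List Int) (b : List Int) : Bool :=
  let deficits := (PySem.List.pyRange 0 n 1).filter
    (fun i => decide (PySem.List.pyGetD a i 0 < PySem.List.pyGetD b i 0))
  if deficits.isEmpty then true
  else if a.sum < b.sum then false
  else
    match deficits with
    | [i] =>
      let d := PySem.List.pyGetD b i 0 - PySem.List.pyGetD a i 0
      ((PySem.List.pyRange 0 n 1).filter (fun j => decide (j ≠ i))).all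
        (fun j => decide (d ≤ PySem.List.pyGetD a j 0 - PySem.List.pyGetD b j 0))
    | _ => false

-- ===== PRECONDITION & SPEC =====
-- Pre_ excludes n > len(a) or n > len(b): indexing past the end raises IndexError in both
-- Pythons; A's short-circuiting loops sometimes return False before reaching the bad index,
-- but B naturally raises on all such inputs, so they lie outside the claim.
def Pre_can_craft (n : Int) (a : List Int) (b : List Int) : Prop :=
  n ≤ (a.length : Int) ∧ n ≤ (b.length : Int)
instance (n : Int) (a : List Int) (b : List Int) : Decidable (Pre_can_craft n a b) := by
  unfold Pre_can_craft; infer_instance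
def pvWitness_can_craft : Int × List Int × List Int := (2, [1, 2], [1, 1])

def Spec_can_craft (n : Int) (a : List Int) (b : List Int) (out : Bool) : Prop := out = can_craft_alt n a b
instance (n : Int) (a : List Int) (b : List Int) (out : Bool) : Decidable (Spec_can_craft n a b out) := by unfold Spec_can_craft; infer_instance

-- ===== CLAIM (what is proved, stated in full; the proofs are below) =====
def Claim_equal_can_craft : Prop := ∀ (n : Int) (a : List Int) (b : List Int), Dom_can_craft n a b → Pre_can_craft n a b → Spec_can_craft n a b (can_craft n a b)

-- ===== LEMMAS AND PROOFS =====

-- A's early `return False` in the inner loop: `none` iff some other index spares less than the deficit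
lemma innerA_none_iff (cur req : List Int) (i d : Int) :
    ∀ (js : List Int) (m : Option Int) (s : Int),
      canCraftInnerA cur req i d js m s = none ↔
        ∃ j ∈ js, j ≠ i ∧ PySem.List.pyGetD cur j 0 - PySem.List.pyGetD req j 0 < d := by
  intro js
  induction js with
  | nil => intro m s; simp [canCraftInnerA]
  | cons j js ih =>
    intro m s
    simp only [canCraftInnerA]
    split_ifs with hji hlt
    · simp [ih, hji]
    · simp [hji, hlt]
    · simp only [ih, List.mem_cons]
      constructor
      · rintro ⟨x, hx, hxi, hxd⟩; exact ⟨x, Or.inr hx, hxi, hxd⟩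
      · rintro ⟨x, hx | hx, hxi, hxd⟩
        · subst hx; omega
        · exact ⟨x, hx, hxi, hxd⟩

-- A's inner loop when every other index spares at least the deficit: it terminates with
-- sum ≥ d·(number of other indices) and running minimum ≥ d (still `inf` only if no other index)
lemma innerA_some_spec (cur req : List Int) (i d : Int) :
    ∀ (js : List Int) (m : Option Int) (s : Int),
      (∀ j ∈ js, j ≠ i → d ≤ PySem.List.pyGetD cur j 0 - PySem.List.pyGetD req j 0) →
      (∀ mv, m = some mv → d ≤ mv) →
      ∃ m' s', canCraftInnerA cur req i d js m s = some (m', s') ∧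
        d * (js.countP (fun j => decide (j ≠ i)) : Int) + s ≤ s' ∧
        (∀ mv, m' = some mv → d ≤ mv) ∧
        (js.countP (fun j => decide (j ≠ i)) = 0 → m' = m ∧ s' = s) ∧
        (m' = none → js.countP (fun j => decide (j ≠ i)) = 0) := by
  intro js
  induction js with
  | nil =>
    intro m s _ hm
    exact ⟨m, s, rfl, by simp, hm, fun _ => ⟨rfl, rfl⟩, fun _ => by simp⟩
  | cons j js ih =>
    intro m s hall hm
    have hcount_eq : j = i → (j :: js).countP (fun x => decide (x ≠ i)) =
        js.countP (fun x => decide (x ≠ i)) := by intro h; simp [h]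
    have hcount_succ : j ≠ i → (j :: js).countP (fun x => decide (x ≠ i)) =
        js.countP (fun x => decide (x ≠ i)) + 1 := by intro h; simp [h]
    simp only [canCraftInnerA]
    split_ifs with hji hlt
    · rw [hcount_eq hji]
      exact ih m s (fun x hx => hall x (List.mem_cons_of_mem _ hx)) hm
    · exact absurd (hall j List.mem_cons_self hji) (by omega)
    · set e := PySem.List.pyGetD cur j 0 - PySem.List.pyGetD req j 0 with he
      have hde : d ≤ e := hall j List.mem_cons_self hji
      rw [hcount_succ hji]
      cases m with
      | none =>
        obtain ⟨m', s', heq, hs, hmd, hcnt, hnone⟩ :=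
          ih (some e) (s + e) (fun x hx => hall x (List.mem_cons_of_mem _ hx))
            (fun mv hmv => by simp only [Option.some.injEq] at hmv; omega)
        refine ⟨m', s', heq, by push_cast; nlinarith, hmd, ?_, ?_⟩
        · intro h; omega
        · intro h'
          obtain ⟨hm', -⟩ := hcnt (hnone h')
          simp [h'] at hm' 
      | some mv0 =>
        have hdm : d ≤ min mv0 e := le_min (hm mv0 rfl) hde
        obtain ⟨m', s', heq, hs, hmd, hcnt, hnone⟩ :=
          ih (some (min mv0 e)) (s + e) (fun x hx => hall x (List.mem_cons_of_mem _ hx))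
            (fun mv hmv => by simp only [Option.some.injEq] at hmv; omega)
        refine ⟨m', s', heq, by push_cast; nlinarith, hmd, ?_, ?_⟩
        · intro h; omega
        · intro h'
          obtain ⟨hm', -⟩ := hcnt (hnone h')
          simp [h'] at hm' 

-- count of the "other" indices in range(n)
lemma countP_ne_pyRange (n i : Int) (hi : i ∈ PySem.List.pyRange 0 n 1) :
    ((PySem.List.pyRange 0 n 1).countP (fun j => decide (j ≠ i)) : Int) = n - 1 := by
  have hn := (PySem.List.mem_pyRange_one.mp hi)
  have h1 : (PySem.List.pyRange 0 n 1).count i = 1 :=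
    List.count_eq_one_of_mem (PySem.List.nodup_pyRange_one 0 n) hi
  have h2 := List.length_eq_countP_add_countP (fun j => decide (j ≠ i))
    (l := PySem.List.pyRange 0 n 1)
  have h3 : (PySem.List.pyRange 0 n 1).countP (fun x => decide ¬(decide (x ≠ i) = true)) =
      (PySem.List.pyRange 0 n 1).count i := by
    rw [List.count]; apply List.countP_congr; intro x _
    by_cases h : x = i <;> simp [h]
  have h4 := PySem.List.length_pyRange_one (a := 0) (b := n)
  omega

-- A's outer loop over indices with no deficit returns True
lemma outerA_skip (n : Int) (cur req : List Int) :
    ∀ js, (∀ i ∈ js, PySem.List.pyGetD req i 0 - PySem.List.pyGetD cur i 0 ≤ 0) →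
      canCraftOuterA n cur req js = true := by
  intro js
  induction js with
  | nil => intro _; rfl
  | cons j js ih =>
    intro h
    simp only [canCraftOuterA]
    rw [if_pos (h j List.mem_cons_self)]
    exact ih (fun x hx => h x (List.mem_cons_of_mem _ hx))

-- A's outer loop returns False as soon as a deficit index has a second deficit index in range(n)
lemma outerA_two (n : Int) (cur req : List Int) :
    ∀ js, (∀ x ∈ js, PySem.List.pyGetD cur x 0 < PySem.List.pyGetD req x 0 →
            ∃ j ∈ PySem.List.pyRange 0 n 1, j ≠ x ∧
              PySem.List.pyGetD cur j 0 < PySem.List.pyGetD req j 0) →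
          (∃ x ∈ js, PySem.List.pyGetD cur x 0 < PySem.List.pyGetD req x 0) →
          canCraftOuterA n cur req js = false := by
  intro js
  induction js with
  | nil => rintro _ ⟨x, hx, _⟩; simp at hx
  | cons j js ih =>
    rintro hpart ⟨x, hx, hxd⟩
    simp only [canCraftOuterA]
    by_cases hj : PySem.List.pyGetD req j 0 - PySem.List.pyGetD cur j 0 ≤ 0
    · rw [if_pos hj]
      apply ih (fun y hy => hpart y (List.mem_cons_of_mem _ hy))
      rcases List.mem_cons.mp hx with h | h
      · subst h; omega
      · exact ⟨x, h, hxd⟩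
    · rw [if_neg hj]
      obtain ⟨j2, hj2r, hj2ne, hj2d⟩ := hpart j List.mem_cons_self (by omega)
      have : canCraftInnerA cur req j
          (PySem.List.pyGetD req j 0 - PySem.List.pyGetD cur j 0)
          (PySem.List.pyRange 0 n 1) none 0 = none :=
        (innerA_none_iff cur req j _ _ none 0).mpr ⟨j2, hj2r, hj2ne, by omega⟩
      rw [this]

-- A's outer loop when the unique deficit index is i: result = B's "every other index spares ≥ d"
lemma outerA_one (n : Int) (cur req : List Int) (i : Int)
    (hi : i ∈ PySem.List.pyRange 0 n 1)
    (hd : PySem.List.pyGetD cur i 0 < PySem.List.pyGetD req i 0) :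
    ∀ js, js.filter (fun x => decide (PySem.List.pyGetD cur x 0 < PySem.List.pyGetD req x 0)) = [i] →
      canCraftOuterA n cur req js =
        ((PySem.List.pyRange 0 n 1).filter (fun j => decide (j ≠ i))).all
          (fun j => decide (PySem.List.pyGetD req i 0 - PySem.List.pyGetD cur i 0 ≤
            PySem.List.pyGetD cur j 0 - PySem.List.pyGetD req j 0)) := by
  intro js
  induction js with
  | nil => intro h; simp at h
  | cons j js ih =>
    intro hfil
    simp only [canCraftOuterA]
    by_cases hj : PySem.List.pyGetD req j 0 - PySem.List.pyGetD cur j 0 ≤ 0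
    · rw [if_pos hj]
      apply ih
      rwa [List.filter_cons_of_neg (by simp; omega)] at hfil
    · rw [if_neg hj]
      rw [List.filter_cons_of_pos (by simp; omega)] at hfil
      have hji : j = i := by simpa using congrArg (fun l => l.head? ) hfil
      subst hji
      have hrest : js.filter
          (fun x => decide (PySem.List.pyGetD cur x 0 < PySem.List.pyGetD req x 0)) = [] := by
        simpa using congrArg (fun l => l.tail) hfil
      set d := PySem.List.pyGetD req j 0 - PySem.List.pyGetD cur j 0 with hdd
      by_cases hall : ∀ x ∈ PySem.List.pyRange 0 n 1, x ≠ j →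
          d ≤ PySem.List.pyGetD cur x 0 - PySem.List.pyGetD req x 0
      · obtain ⟨m', s', heq, hs, hmd, hcnt, hnone⟩ :=
          innerA_some_spec cur req j d (PySem.List.pyRange 0 n 1) none 0 hall (by simp)
        rw [heq]
        have hcount := countP_ne_pyRange n j hi
        have hnge := (PySem.List.mem_pyRange_one.mp hi)
        have htail : canCraftOuterA n cur req js = true :=
          outerA_skip n cur req js (by
            intro x hx
            have := List.filter_eq_nil_iff.mp hrest x hx
            simp at this; omega)
        have hrhs : ((PySem.List.pyRange 0 n 1).filter (fun x => decide (x ≠ j))).all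
            (fun x => decide (d ≤ PySem.List.pyGetD cur x 0 - PySem.List.pyGetD req x 0)) = true := by
          simp only [List.all_eq_true]
          intro x hx
          have hx' := List.mem_filter.mp hx
          simp only [decide_eq_true_eq] at hx' ⊢
          exact hall x hx'.1 hx'.2
        rw [hrhs]
        cases m' with
        | none =>
          have hc0 : (PySem.List.pyRange 0 n 1).countP (fun x => decide (x ≠ j)) = 0 :=
            hnone rfl
          have hcond2 : decide (s' < d * (n - 1)) = false := by
            simp only [decide_eq_false_iff_not, not_lt]
            have : (n : Int) - 1 = 0 := by omega
            rw [this]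
            rw [hc0] at hs
            push_cast at hs
            omega
          show (if ((false : Bool) || decide (s' < d * (n - 1))) = true then false
            else canCraftOuterA n cur req js) = true
          rw [hcond2, htail]
          simp
        | some mv =>
          have hmv := hmd mv rfl
          have hn2 : 2 ≤ n := by
            by_contra hn1
            have hc0 : (PySem.List.pyRange 0 n 1).countP (fun x => decide (x ≠ j)) = 0 := by
              omega
            have := (hcnt hc0).1
            simp at this
          have hcond1 : decide (mv * (n - 1) < d) = false := by
            simp only [decide_eq_false_iff_not, not_lt]
            nlinarith
          have hcond2 : decide (s' < d * (n - 1)) = false := by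
            simp only [decide_eq_false_iff_not, not_lt]
            nlinarith
          show (if (decide (mv * (n - 1) < d) || decide (s' < d * (n - 1))) = true then false
            else canCraftOuterA n cur req js) = true
          rw [hcond1, hcond2, htail]
          simp
      · push Not at hall
        obtain ⟨x, hxr, hxj, hxd⟩ := hall
        have : canCraftInnerA cur req j d (PySem.List.pyRange 0 n 1) none 0 = none :=
          (innerA_none_iff cur req j d _ none 0).mpr ⟨x, hxr, hxj, by omega⟩
        rw [this]
        symm
        simp only [List.all_eq_false]
        exact ⟨x, List.mem_filter.mpr ⟨hxr, by simpa using hxj⟩, by simpa using (by omega : ¬ d ≤ PySem.List.pyGetD cur x 0 - PySem.List.pyGetD req x 0)⟩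

-- ===== VERDICT (by name: the statement is the Claim_ definition above) =====
theorem can_craft_spec : Claim_equal_can_craft := by
  intro n a b _ _
  unfold Spec_can_craft can_craft can_craft_alt
  dsimp only
  by_cases hall : ∀ i ∈ PySem.List.pyRange 0 n 1,
      PySem.List.pyGetD b i 0 ≤ PySem.List.pyGetD a i 0
  · have h1 : (PySem.List.pyRange 0 n 1).all
        (fun i => decide (PySem.List.pyGetD b i 0 ≤ PySem.List.pyGetD a i 0)) = true := by
      simp only [List.all_eq_true, decide_eq_true_eq]; exact hall
    have h2 : (PySem.List.pyRange 0 n 1).filter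
        (fun i => decide (PySem.List.pyGetD a i 0 < PySem.List.pyGetD b i 0)) = [] :=
      List.filter_eq_nil_iff.mpr (fun x hx => by
        simp only [decide_eq_true_eq, not_lt]; exact hall x hx)
    simp [h1, h2]
  · have h1 : (PySem.List.pyRange 0 n 1).all
        (fun i => decide (PySem.List.pyGetD b i 0 ≤ PySem.List.pyGetD a i 0)) = false := by
      simp only [List.all_eq_false]
      push Not at hall
      obtain ⟨x, hx, hxd⟩ := hall
      exact ⟨x, hx, by simpa using (by omega : ¬ PySem.List.pyGetD b x 0 ≤ PySem.List.pyGetD a x 0)⟩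
    rw [h1]
    cases hfil : (PySem.List.pyRange 0 n 1).filter
        (fun i => decide (PySem.List.pyGetD a i 0 < PySem.List.pyGetD b i 0)) with
    | nil =>
      exfalso
      push Not at hall
      obtain ⟨x, hx, hxd⟩ := hall
      have := List.filter_eq_nil_iff.mp hfil x hx
      simp at this; omega
    | cons i rest =>
      have hemp : (i :: rest).isEmpty = false := rfl
      rw [hemp]
      simp only [Bool.false_eq_true, if_false]
      by_cases hs : a.sum < b.sum
      · rw [if_pos hs, if_pos hs]
      · rw [if_neg hs, if_neg hs]
        have hi : i ∈ PySem.List.pyRange 0 n 1 ∧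
            PySem.List.pyGetD a i 0 < PySem.List.pyGetD b i 0 := by
          have : i ∈ (PySem.List.pyRange 0 n 1).filter
              (fun i => decide (PySem.List.pyGetD a i 0 < PySem.List.pyGetD b i 0)) := by
            rw [hfil]; exact List.mem_cons_self
          have := List.mem_filter.mp this
          simpa using this
        cases rest with
        | nil => exact outerA_one n a b i hi.1 hi.2 (PySem.List.pyRange 0 n 1) hfil
        | cons i2 rest2 =>
          have hi2 : i2 ∈ PySem.List.pyRange 0 n 1 ∧
              PySem.List.pyGetD a i2 0 < PySem.List.pyGetD b i2 0 := by
            have : i2 ∈ (PySem.List.pyRange 0 n 1).filter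
                (fun i => decide (PySem.List.pyGetD a i 0 < PySem.List.pyGetD b i 0)) := by
              rw [hfil]; exact List.mem_cons_of_mem _ List.mem_cons_self
            have := List.mem_filter.mp this
            simpa using this
          have hne : i ≠ i2 := by
            have hnd : ((PySem.List.pyRange 0 n 1).filter
                (fun i => decide (PySem.List.pyGetD a i 0 < PySem.List.pyGetD b i 0))).Nodup :=
              (PySem.List.nodup_pyRange_one 0 n).filter _
            rw [hfil] at hnd
            simp at hnd
            exact fun h => hnd.1.1 h
          rw [outerA_two n a b (PySem.List.pyRange 0 n 1) ?_ ⟨i, hi.1, hi.2⟩]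
          · intro x hx hxd
            by_cases hxi : x = i
            · exact ⟨i2, hi2.1, by rw [hxi]; exact fun h => hne h.symm, hi2.2⟩
            · exact ⟨i, hi.1, fun h => hxi h.symm, hi.2⟩
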